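-- pv_equiv track=rewrite | github.com/lil-lab/drif | utils/dict_tools.py | dict_zip
-- ===== SOURCE A (Python) =====
-- def dict_zip(list_of_dicts):
--     """
--     Zip function for dicts!
--     Turns a list of dictionaries into a dictionary of lists,
--     where each list contains all the elements from the given key in the original list of dicts
--     :param list_of_dicts:
--     :return:
--     """
--     outdict = {}
--     for dict in list_of_dicts:
--         for key,item in dict.items():
--             if key not in outdict:
--                 outdict[key] = []
--             outdict[key].append(item)
--     return outdict
-- ===== SOURCE B (Python) =====
-- def dict_zip(list_of_dicts):
--     # Simpler transposed decomposition: first the ordered key set, then one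
--     # comprehension per key gathering that key's values across the dicts.
--     keys = dict.fromkeys(key for d in list_of_dicts for key in d)
--     return {key: [d[key] for d in list_of_dicts if key in d] for key in keys}
-- ===== Notes on version B (the rewrite author's own statement) =====
-- stated objective: simpler
-- what changed: Instead of accumulating per-key lists while scanning dicts (create-if-missing then append), B first computes the ordered unique key set with dict.fromkeys and then builds the result by one comprehension per key that re-scans the dicts; Pre_ only excludes Lean-side association lists whose inner lists carry duplicate keys, which do not represent a Python dict.
import Mathlib
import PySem

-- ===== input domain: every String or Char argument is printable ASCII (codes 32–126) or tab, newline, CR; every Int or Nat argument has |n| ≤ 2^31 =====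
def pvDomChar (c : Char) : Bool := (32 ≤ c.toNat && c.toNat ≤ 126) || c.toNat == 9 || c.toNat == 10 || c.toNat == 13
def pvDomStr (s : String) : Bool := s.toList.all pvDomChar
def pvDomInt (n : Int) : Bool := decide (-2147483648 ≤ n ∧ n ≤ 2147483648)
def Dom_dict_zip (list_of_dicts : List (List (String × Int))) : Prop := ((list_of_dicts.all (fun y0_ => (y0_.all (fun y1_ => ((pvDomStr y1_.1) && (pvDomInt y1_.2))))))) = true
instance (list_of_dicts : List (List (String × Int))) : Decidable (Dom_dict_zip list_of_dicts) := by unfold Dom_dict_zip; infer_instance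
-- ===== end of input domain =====

-- B replaces A's accumulate-while-scanning grouping by a transposed decomposition
-- (ordered unique keys first, then one gathering pass per key); objective: simpler.


-- ===== PORT A =====
-- outdict = {}; for dict in list_of_dicts: for key,item in dict.items():
--   if key not in outdict: outdict[key] = []
--   outdict[key].append(item)
def dict_zip (list_of_dicts : List (List (String × Int))) : List (String × List Int) :=
  (list_of_dicts.foldl
    (fun outdict d =>
      d.foldl
        (fun outdict kv =>
          (if outdict.contains kv.1 then outdict else outdict.insert kv.1 ([] : List Int)).modify
            kv.1 [] (fun l => l ++ [kv.2]))
        outdict)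
    PySem.Dict.empty).items

-- ===== PORT B =====
-- keys = dict.fromkeys(key for d in list_of_dicts for key in d)
-- return {key: [d[key] for d in list_of_dicts if key in d] for key in keys}
def dict_zip_alt (list_of_dicts : List (List (String × Int))) : List (String × List Int) :=
  let keys := PySem.List.dedup (list_of_dicts.flatMap (fun d => d.map Prod.fst))
  keys.map (fun key =>
    (key, list_of_dicts.filterMap (fun d => (d.find? (fun q => q.1 == key)).map Prod.snd)))

-- ===== PRECONDITION & SPEC =====
-- Pre_ excludes inner association lists with duplicate keys: such a list does not
-- represent any Python dict (building the dict would collapse the duplicates).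
def Pre_dict_zip (list_of_dicts : List (List (String × Int))) : Prop :=
  ∀ d ∈ list_of_dicts, (d.map Prod.fst).Nodup
instance (list_of_dicts : List (List (String × Int))) : Decidable (Pre_dict_zip list_of_dicts) := by unfold Pre_dict_zip; infer_instance
def pvWitness_dict_zip : (List (List (String × Int))) :=
  [[("a", 1), ("b", 2)], [], [("b", 3), ("c", 4)]]
def Spec_dict_zip (list_of_dicts : List (List (String × Int))) (out : List (String × List Int)) : Prop := out = dict_zip_alt list_of_dicts
instance (list_of_dicts : List (List (String × Int))) (out : List (String × List Int)) : Decidable (Spec_dict_zip list_of_dicts out) := by unfold Spec_dict_zip; infer_instance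

-- ===== CLAIM (what is proved, stated in full; the proofs are below) =====
def Claim_equal_dict_zip : Prop := ∀ (list_of_dicts : List (List (String × Int))), Dom_dict_zip list_of_dicts → Pre_dict_zip list_of_dicts → Spec_dict_zip list_of_dicts (dict_zip list_of_dicts)

-- ===== LEMMAS AND PROOFS =====

-- A's loop body (setdefault-to-[] then append) is exactly a modify with default [].
theorem pv_step_eq (d : PySem.Dict String (List Int)) (kv : String × Int) :
    (if d.contains kv.1 then d else d.insert kv.1 ([] : List Int)).modify
      kv.1 [] (fun l => l ++ [kv.2]) = d.modify kv.1 [] (fun l => l ++ [kv.2]) := by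
  by_cases h : d.contains kv.1
  · simp [h]
  · simp only [h, Bool.false_eq_true, if_false]
    simp [PySem.Dict.modify, PySem.Dict.insert_insert_self, PySem.Dict.getD_insert_self,
      PySem.Dict.getD_of_not_contains d ([] : List Int) (by simpa using h)]

-- one dict with unique keys: gathering all matches of a key is its first (only) match
theorem pv_find_filter (d : List (String × Int)) (k : String)
    (hnd : (d.map Prod.fst).Nodup) :
    ((d.find? (fun q => q.1 == k)).map Prod.snd).toList
      = (d.filter (fun p => p.1 == k)).map Prod.snd := by
  induction d with
  | nil => simp
  | cons q t ih =>
    rw [List.map_cons, List.nodup_cons] at hnd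
    by_cases hq : q.1 = k
    · subst hq
      have ht : t.filter (fun p => p.1 == q.1) = [] := by
        rw [List.filter_eq_nil_iff]
        intro p hp hpk
        have hpq : p.1 = q.1 := by simpa using hpk
        exact hnd.1 (List.mem_map.mpr ⟨p, hp, hpq⟩)
      rw [List.find?_cons_of_pos (by simp)]
      simp [ht]
    · rw [List.find?_cons_of_neg (by simp [hq])]
      simp only [List.filter_cons, beq_iff_eq, hq, if_false]
      exact ih hnd.2

-- B's per-key gather over the dicts equals the filter of the flattened pair list
theorem pv_vals (lod : List (List (String × Int))) (k : String)
    (hpre : ∀ d ∈ lod, (d.map Prod.fst).Nodup) :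
    lod.filterMap (fun d => (d.find? (fun q => q.1 == k)).map Prod.snd)
      = ((lod.flatMap id).filter (fun p => p.1 == k)).map Prod.snd := by
  induction lod with
  | nil => simp
  | cons d t ih =>
    have hd := hpre d (by simp)
    have ht := ih (fun d' hd' => hpre d' (by simp [hd']))
    rw [List.filterMap_cons]
    cases hf : (d.find? (fun q => q.1 == k)).map Prod.snd with
    | none =>
      have := pv_find_filter d k hd
      rw [hf] at this
      simp only [List.flatMap_cons, id, List.filter_append, List.map_append, ← this,
        Option.toList_none, List.nil_append]
      exact ht
    | some v =>
      have := pv_find_filter d k hd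
      rw [hf] at this
      simp only [List.flatMap_cons, id, List.filter_append, List.map_append, ← this,
        Option.toList_some, List.singleton_append]
      rw [ht]

-- ===== VERDICT (by name: the statement is the Claim_ definition above) =====
theorem dict_zip_spec : Claim_equal_dict_zip := by
  intro lod _ hpre
  unfold Spec_dict_zip dict_zip dict_zip_alt
  -- A's loop body rewrites to the bare modify step (pv_step_eq, under the fold's binder)
  simp only [pv_step_eq]
  rw [show (lod.foldl (fun out d =>
        d.foldl (fun outdict kv => outdict.modify kv.1 [] (fun l => l ++ [kv.2])) out)
        PySem.Dict.empty)
      = ((lod.flatMap id).foldl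
          (fun outdict kv => outdict.modify kv.1 [] (fun l => l ++ [kv.2]))
          PySem.Dict.empty) from (List.foldl_flatMap).symm]
  set F := ((lod.flatMap id).foldl
      (fun outdict kv => outdict.modify kv.1 [] (fun l => l ++ [kv.2]))
      PySem.Dict.empty) with hF
  have hndk : F.keys.Nodup := by
    rw [hF]
    exact PySem.Dict.nodup_keys_foldl_modify_key _ _ _ _ _ PySem.Dict.nodup_keys_empty
  have hkeys : F.keys = PySem.List.dedup (lod.flatMap (fun d => d.map Prod.fst)) := by
    rw [hF, PySem.Dict.keys_foldl_modify_key]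
    simp [PySem.Set.update_nil_left, List.flatMap_def]
  rw [PySem.Dict.items_eq_map_keys F hndk [], hkeys]
  apply List.map_congr_left
  intro k _
  have hget : F.getD k [] = (((lod.flatMap id).filter (fun p => p.1 == k)).map Prod.snd) := by
    rw [hF, PySem.Dict.getD_foldl_modify_append]
    simp [PySem.Dict.getD_empty]
  rw [hget, pv_vals lod k hpre]
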